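-- pv_equiv track=rewrite | github.com/IvanKalug-QA/codewars | Dominant_array_elements.py | solve
-- ===== SOURCE A (Python) =====
-- def solve(arr):
--     result = []
--     for i in range(len(arr)):
--         for j in range(i + 1, len(arr)):
--             if arr[i] <= arr[j]:
--                 break
--         else:
--             result.append(arr[i])
--     return result
-- ===== SOURCE B (Python) =====
-- def solve(arr):
--     # single right-to-left pass tracking the running suffix maximum
--     res = []
--     mx = None
--     for x in reversed(arr):
--         if mx is None or x > mx:
--             res.append(x)
--             mx = x
--     res.reverse()
--     return res
-- ===== Notes on version B (the rewrite author's own statement) =====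
-- stated objective: faster
-- what changed: Replaced the quadratic scan (for each element, scan all following elements) by one right-to-left pass that keeps an element iff it exceeds the running suffix maximum.
import Mathlib
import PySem

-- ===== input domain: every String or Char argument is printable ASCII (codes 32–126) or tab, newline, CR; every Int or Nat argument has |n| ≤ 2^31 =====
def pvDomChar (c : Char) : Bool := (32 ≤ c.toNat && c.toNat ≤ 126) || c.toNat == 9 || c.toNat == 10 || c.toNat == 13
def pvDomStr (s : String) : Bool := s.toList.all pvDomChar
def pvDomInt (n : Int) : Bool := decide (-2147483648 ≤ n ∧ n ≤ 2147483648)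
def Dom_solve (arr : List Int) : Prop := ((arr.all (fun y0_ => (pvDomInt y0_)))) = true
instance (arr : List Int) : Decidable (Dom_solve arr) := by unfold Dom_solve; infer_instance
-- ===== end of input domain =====

-- B changes A's quadratic for-each-element rescan of the tail into one right-to-left pass
-- tracking the suffix maximum (objective: faster, asymptotic).

-- ===== PORT A =====
-- inner loop "for j in range(i+1, len(arr)): if arr[i] <= arr[j]: break":
-- returns true iff the loop finishes without break (the for/else clause fires)
def solveInner (x : Int) : List Int → Bool
  | [] => true
  | y :: ys => if x ≤ y then false else solveInner x ys

-- outer loop over i; the suffix arr[i+1:] is the tail at each step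
def solveGo : List Int → List Int
  | [] => []
  | x :: xs => if solveInner x xs then x :: solveGo xs else solveGo xs

def solve (arr : List Int) : List Int := solveGo arr

-- ===== PORT B =====
-- right-to-left pass: returns (running suffix maximum, kept elements in order)
def solveAltGo : List Int → Option Int × List Int
  | [] => (none, [])
  | x :: xs =>
    let (mx, res) := solveAltGo xs
    match mx with
    | none => (some x, x :: res)
    | some m => if x > m then (some x, x :: res) else (some m, res)

def solve_alt (arr : List Int) : List Int := (solveAltGo arr).2

-- ===== PRECONDITION & SPEC =====
def Spec_solve (arr : List Int) (out : List Int) : Prop := out = solve_alt arr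
instance (arr : List Int) (out : List Int) : Decidable (Spec_solve arr out) := by unfold Spec_solve; infer_instance

-- ===== CLAIM (what is proved, stated in full; the proofs are below) =====
def Claim_equal_solve : Prop := ∀ (arr : List Int), Dom_solve arr → Spec_solve arr (solve arr)

-- ===== LEMMAS AND PROOFS =====

-- A's inner scan succeeds exactly when x beats the suffix maximum B maintains
theorem solveInner_eq_max (x : Int) (xs : List Int) :
    solveInner x xs = match (solveAltGo xs).1 with
      | none => true
      | some m => decide (m < x) := by
  induction xs with
  | nil => rfl
  | cons y ys ih =>
    simp only [solveInner, solveAltGo]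
    cases h : solveAltGo ys with
    | mk mx res =>
      rw [h] at ih
      cases mx with
      | none =>
        simp only [ih]
        by_cases hxy : x ≤ y <;> simp [hxy] <;> omega
      | some m =>
        simp only [ih]
        by_cases hym : y > m
        · simp only [if_pos hym]
          by_cases hxy : x ≤ y <;> simp [hxy] <;> omega
        · simp only [if_neg hym]
          by_cases hxy : x ≤ y <;> simp [hxy] <;> omega

theorem solveGo_eq_alt (xs : List Int) : solveGo xs = (solveAltGo xs).2 := by
  induction xs with
  | nil => rfl
  | cons x ys ih =>
    simp only [solveGo, solveAltGo, solveInner_eq_max, ih]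
    cases h : solveAltGo ys with
    | mk mx res =>
      cases mx with
      | none => simp
      | some m =>
        by_cases hm : m < x
        · simp [hm]
        · simp [hm]

-- ===== VERDICT (by name: the statement is the Claim_ definition above) =====
theorem solve_spec : Claim_equal_solve := by
  intro arr _
  unfold Spec_solve solve solve_alt
  exact solveGo_eq_alt arr
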